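-- pv_equiv track=rewrite | github.com/eirieri/D-Wave | jobschedule.py | monomToIndicies
-- ===== SOURCE A (Python) =====
-- def monomToIndicies(monom):
--     # Only one power
--     if sum(monom) == 1:
--         for i in range(len(monom)):
--             if monom[i] == 1:
--                 return i, i
--
--
--     # There must be a quadratic monom
--     elif sum(monom) == 2:
--         # Find the first non-zero index
--         for i in range(len(monom)):
--             if monom[i] == 2:
--                 return i, i
--             elif monom[i] == 1:
--                 break
--
--         # Find the second non-zero index
--         for j in range(i + 1, len(monom)):
--             if monom[j] == 1:
--                 return i, j
--
--     else:
--         return None, None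
-- ===== SOURCE B (Python) =====
-- def monomToIndicies(monom):
--     s = sum(monom)
--     ones = [i for i, v in enumerate(monom) if v == 1]
--     twos = [i for i, v in enumerate(monom) if v == 2]
--     if s == 1:
--         return ones[0], ones[0]
--     if s == 2:
--         if twos and (not ones or twos[0] < ones[0]):
--             return twos[0], twos[0]
--         return ones[0], ones[1]
--     return None, None
-- ===== Notes on version B (the rewrite author's own statement) =====
-- stated objective: simpler
-- what changed: Replaces A's two stateful break-scans (scan for a 2 or break at a 1, then a second scan from the break index) with two index tables built once (positions of 1s and of 2s) plus head comparisons, so no loop state survives between passes.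
-- outside the precondition, e.g. on monomToIndicies([3, -2]): A returns None, B raises IndexError; on monomToIndicies([1, 3, -2]): A returns None, B raises IndexError
import Mathlib
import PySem

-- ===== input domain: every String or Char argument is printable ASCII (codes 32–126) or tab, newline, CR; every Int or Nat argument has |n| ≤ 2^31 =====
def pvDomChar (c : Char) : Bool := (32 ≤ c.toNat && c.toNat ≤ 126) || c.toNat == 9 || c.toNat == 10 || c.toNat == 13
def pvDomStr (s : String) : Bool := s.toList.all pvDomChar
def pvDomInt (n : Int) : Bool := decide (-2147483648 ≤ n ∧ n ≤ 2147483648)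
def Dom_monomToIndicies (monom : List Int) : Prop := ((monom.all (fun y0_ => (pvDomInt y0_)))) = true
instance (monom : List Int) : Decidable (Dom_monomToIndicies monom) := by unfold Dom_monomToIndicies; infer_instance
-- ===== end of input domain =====

-- B replaces A's two stateful break-scans by index tables (ones/twos, built once) and head comparisons; objective: simpler, same cost.

-- ===== PORT A =====
-- first loop (sum == 1 branch): return (i, i) at the first 1; falling off returns bare None in Python (outside Pre_, placeholder (none, none))
def pvA_loop1 : List Int → Int → Option Int × Option Int
  | [], _ => (none, none)
  | v :: rest, i => if v = 1 then (some i, some i) else pvA_loop1 rest (i + 1)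

-- second loop of the sum == 2 branch: scan from j for a 1, having broken at index i; fall-off returns bare None (outside Pre_)
def pvA_loop3 : List Int → Int → Int → Option Int × Option Int
  | [], _, _ => (none, none)
  | v :: rest, j, i => if v = 1 then (some i, some j) else pvA_loop3 rest (j + 1) i

-- first loop of the sum == 2 branch: return at a 2, break at a 1 (then run the j-loop); if neither occurs the j-loop is empty and Python returns bare None (outside Pre_)
def pvA_loop2 : List Int → Int → Option Int × Option Int
  | [], _ => (none, none)
  | v :: rest, i =>
    if v = 2 then (some i, some i)
    else if v = 1 then pvA_loop3 rest (i + 1) i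
    else pvA_loop2 rest (i + 1)

def monomToIndicies (monom : List Int) : Option Int × Option Int :=
  if monom.sum = 1 then pvA_loop1 monom 0
  else if monom.sum = 2 then pvA_loop2 monom 0
  else (none, none)

-- ===== PORT B =====
def monomToIndicies_alt (monom : List Int) : Option Int × Option Int :=
  let s := monom.sum
  let ones := (PySem.List.enumerate monom).filterMap (fun p => if p.2 = 1 then some p.1 else none)
  let twos := (PySem.List.enumerate monom).filterMap (fun p => if p.2 = 2 then some p.1 else none)
  if s = 1 then
    match ones with
    | a :: _ => (some a, some a)
    | [] => (none, none)          -- Python: ones[0] raises IndexError here (outside Pre_)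
  else if s = 2 then
    match twos, ones with
    | t :: _, [] => (some t, some t)
    | t :: _, a :: os =>
      if t < a then (some t, some t)
      else match os with
        | b :: _ => (some a, some b)
        | [] => (none, none)      -- Python: ones[1] raises IndexError here (outside Pre_)
    | [], a :: b :: _ => (some a, some b)
    | [], _ => (none, none)       -- Python: ones[0]/ones[1] raises IndexError here (outside Pre_)
  else (none, none)

-- ===== PRECONDITION & SPEC =====
-- Pre_ excludes exactly the inputs on which A falls off its loops and returns bare None (not a pair):
-- sum 1 with no entry equal to 1, and sum 2 where neither a 2 precedes every 1 nor two 1s exist; B raises IndexError there.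
def Pre_monomToIndicies (monom : List Int) : Prop :=
  (monom.sum = 1 → (1 : Int) ∈ monom) ∧
  (monom.sum = 2 →
    ((2 : Int) ∈ monom ∧ monom.idxOf (2 : Int) < monom.idxOf (1 : Int)) ∨ 2 ≤ monom.count (1 : Int))
instance (monom : List Int) : Decidable (Pre_monomToIndicies monom) := by
  unfold Pre_monomToIndicies; infer_instance

def pvWitness_monomToIndicies : List Int := [0, 1, 1]

def Spec_monomToIndicies (monom : List Int) (out : Option Int × Option Int) : Prop := out = monomToIndicies_alt monom
instance (monom : List Int) (out : Option Int × Option Int) : Decidable (Spec_monomToIndicies monom out) := by unfold Spec_monomToIndicies; infer_instance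

-- ===== CLAIM (what is proved, stated in full; the proofs are below) =====
def Claim_equal_monomToIndicies : Prop := ∀ (monom : List Int), Dom_monomToIndicies monom → Pre_monomToIndicies monom → Spec_monomToIndicies monom (monomToIndicies monom)

-- ===== LEMMAS AND PROOFS =====

-- indices (offset by s) of the entries equal to v, as B's tables see them
def pvIdxs (v : Int) : List Int → Int → List Int
  | [], _ => []
  | x :: rest, s => if x = v then s :: pvIdxs v rest (s + 1) else pvIdxs v rest (s + 1)

lemma pvIdxs_ge (v : Int) : ∀ (l : List Int) (s j : Int), j ∈ pvIdxs v l s → s ≤ j := by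
  intro l
  induction l with
  | nil => intro s j h; simp [pvIdxs] at h
  | cons x rest ih =>
    intro s j h
    simp only [pvIdxs] at h
    split at h
    · rcases List.mem_cons.mp h with h | h
      · omega
      · have := ih (s + 1) j h; omega
    · have := ih (s + 1) j h; omega

lemma pvIdxs_eq_filterMap (v : Int) : ∀ (l : List Int) (s : Int),
    pvIdxs v l s = (PySem.List.enumerate l s).filterMap (fun p => if p.2 = v then some p.1 else none) := by
  intro l
  induction l with
  | nil => intro s; simp [pvIdxs, PySem.List.enumerate_nil]
  | cons x rest ih =>
    intro s
    simp only [pvIdxs, PySem.List.enumerate_cons, List.filterMap_cons]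
    split_ifs with h <;> simp [ih]

-- B's sum == 2 decision from the two tables (proof-side description of B's match)
def pvQuad : List Int → List Int → Option Int × Option Int
  | t :: _, [] => (some t, some t)
  | t :: _, a :: os =>
    if t < a then (some t, some t)
    else match os with
      | b :: _ => (some a, some b)
      | [] => (none, none)
  | [], a :: b :: _ => (some a, some b)
  | [], _ => (none, none)

lemma loop1_eq : ∀ (l : List Int) (s : Int),
    pvA_loop1 l s = (match pvIdxs 1 l s with | a :: _ => (some a, some a) | [] => (none, none)) := by
  intro l
  induction l with
  | nil => intro s; simp [pvA_loop1, pvIdxs]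
  | cons x rest ih =>
    intro s
    simp only [pvA_loop1, pvIdxs]
    split_ifs with h <;> simp [ih]

lemma loop3_eq : ∀ (l : List Int) (j i : Int),
    pvA_loop3 l j i = (match pvIdxs 1 l j with | b :: _ => (some i, some b) | [] => (none, none)) := by
  intro l
  induction l with
  | nil => intro j i; simp [pvA_loop3, pvIdxs]
  | cons x rest ih =>
    intro j i
    simp only [pvA_loop3, pvIdxs]
    split_ifs with h <;> simp [ih]

lemma loop2_eq : ∀ (l : List Int) (s : Int),
    pvA_loop2 l s = pvQuad (pvIdxs 2 l s) (pvIdxs 1 l s) := by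
  intro l
  induction l with
  | nil => intro s; simp [pvA_loop2, pvIdxs, pvQuad]
  | cons x rest ih =>
    intro s
    simp only [pvA_loop2, pvIdxs]
    by_cases h2 : x = 2
    · have h1 : ¬ x = 1 := by omega
      simp only [h2, if_neg (by norm_num : ¬ (2:Int) = 1)]
      -- twos table starts with s; every index in ones table is > s
      rcases ho : pvIdxs 1 rest (s + 1) with _ | ⟨a, os⟩
      · simp [pvQuad]
      · have ha : s + 1 ≤ a := pvIdxs_ge 1 rest (s + 1) a (ho ▸ List.mem_cons_self)
        simp [pvQuad, show s < a by omega]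
    · by_cases h1 : x = 1
      · simp only [h1, if_neg (by norm_num : ¬ (1:Int) = 2)]
        rw [loop3_eq]
        -- ones table starts with s; every index in twos table is ≥ s + 1 > s, so pvQuad takes the ones branch
        rcases ht : pvIdxs 2 rest (s + 1) with _ | ⟨t, ts⟩
        · rcases pvIdxs 1 rest (s + 1) with _ | ⟨b, _⟩ <;> simp [pvQuad]
        · have htg : s + 1 ≤ t := pvIdxs_ge 2 rest (s + 1) t (ht ▸ List.mem_cons_self)
          rcases pvIdxs 1 rest (s + 1) with _ | ⟨b, _⟩ <;>
            simp [pvQuad, show ¬ t < s by omega]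
      · simp [h1, h2, ih]

lemma alt_eq_quad (monom : List Int) (h2 : monom.sum = 2) :
    monomToIndicies_alt monom = pvQuad (pvIdxs 2 monom 0) (pvIdxs 1 monom 0) := by
  have hn1 : monom.sum ≠ 1 := by omega
  simp only [monomToIndicies_alt, ← pvIdxs_eq_filterMap, h2]
  rcases pvIdxs 2 monom 0 with _ | ⟨t, ts⟩ <;> rcases pvIdxs 1 monom 0 with _ | ⟨a, os⟩ <;>
    simp [pvQuad]

-- ===== VERDICT (by name: the statement is the Claim_ definition above) =====
theorem monomToIndicies_spec : Claim_equal_monomToIndicies := by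
  intro monom _ _
  unfold Spec_monomToIndicies monomToIndicies
  by_cases h1 : monom.sum = 1
  · simp [h1, loop1_eq, monomToIndicies_alt, ← pvIdxs_eq_filterMap]
  · by_cases h2 : monom.sum = 2
    · simp [h2, loop2_eq, alt_eq_quad monom h2]
    · simp [monomToIndicies_alt, h1, h2]
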